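-- pv_equiv track=rewrite | github.com/sumukhprasad/dips-codejam-2024 | 03-number-arrangement/sampleSolution.py | solve
-- ===== SOURCE A (Python) =====
-- def solve(a, b):
-- 	a_digits = [int(i) for i in str(a)]
-- 	b_digits = [int(i) for i in str(b)]
--
-- 	if len(a_digits) != len(b_digits):
-- 		return False
--
-- 	a_deltas = [a_digits[i+1]-a_digits[i] for i in range(len(a_digits)-1)]
-- 	b_deltas = [b_digits[i+1]-b_digits[i] for i in range(len(b_digits)-1)]
--
-- 	return False if a_deltas != b_deltas else True
-- ===== SOURCE B (Python) =====
-- def solve(a, b):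
--     sa, sb = str(a), str(b)
--     if len(sa) != len(sb):
--         return False
--     d0 = ord(sa[0]) - ord(sb[0])
--     return all(ord(x) - ord(y) == d0 for x, y in zip(sa, sb))
-- ===== Notes on version B (the rewrite author's own statement) =====
-- stated objective: simpler
-- what changed: Instead of building two digit lists and two consecutive-difference lists and comparing them, B compares the raw digit strings positionally: it checks that the per-position character-code difference is constant (equal to the first position's difference), which is algebraically equivalent to equal delta sequences.
import Mathlib
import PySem

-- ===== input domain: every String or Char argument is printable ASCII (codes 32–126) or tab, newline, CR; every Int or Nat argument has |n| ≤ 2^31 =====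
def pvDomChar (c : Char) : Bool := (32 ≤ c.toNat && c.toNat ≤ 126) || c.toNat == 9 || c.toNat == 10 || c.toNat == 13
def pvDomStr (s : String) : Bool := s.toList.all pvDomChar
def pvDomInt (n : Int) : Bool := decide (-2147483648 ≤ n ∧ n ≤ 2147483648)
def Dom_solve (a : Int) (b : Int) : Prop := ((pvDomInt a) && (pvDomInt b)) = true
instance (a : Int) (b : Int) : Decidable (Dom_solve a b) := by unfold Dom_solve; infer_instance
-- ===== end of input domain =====

-- B replaces the two consecutive-difference lists with a single constant-positional-difference
-- check over the digit strings (simpler decomposition, same O(n) cost; return value only).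

-- ===== PORT A =====
-- int(i) for a single char i: exact for digit chars (all chars of str(n) for n ≥ 0, guaranteed
-- by Pre_solve); its value there is code - 48.
def pvDigits (n : Int) : List Int :=
  (PySem.Int.toStr n).toList.map (fun c => (c.toNat : Int) - 48)

-- [xs[i+1]-xs[i] for i in range(len(xs)-1)]; indices are always in range, so getD 0 is exact
def pvDeltas (xs : List Int) : List Int :=
  (List.range (xs.length - 1)).map (fun i => xs.getD (i + 1) 0 - xs.getD i 0)

def solve (a : Int) (b : Int) : Bool :=
  let a_digits := pvDigits a
  let b_digits := pvDigits b
  if a_digits.length ≠ b_digits.length then false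
  else
    let a_deltas := pvDeltas a_digits
    let b_deltas := pvDeltas b_digits
    if a_deltas ≠ b_deltas then false else true

-- ===== PORT B =====
def solve_alt (a : Int) (b : Int) : Bool :=
  let sa := (PySem.Int.toStr a).toList
  let sb := (PySem.Int.toStr b).toList
  if sa.length ≠ sb.length then false
  else
    match sa, sb with
    | x :: _, y :: _ =>
        let d0 : Int := (x.toNat : Int) - (y.toNat : Int)
        (sa.zip sb).all (fun p => ((p.1.toNat : Int) - (p.2.toNat : Int)) == d0)
    | _, _ => true  -- unreachable: str(int) is never empty (Python would raise on sa[0])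

-- ===== PRECONDITION & SPEC =====
-- Pre_ excludes negative a or b: there str(a) starts with '-' and A's int('-') raises ValueError.
def Pre_solve (a : Int) (b : Int) : Prop := 0 ≤ a ∧ 0 ≤ b
instance (a : Int) (b : Int) : Decidable (Pre_solve a b) := by unfold Pre_solve; infer_instance
def pvWitness_solve : Int × Int := (12, 23)

def Spec_solve (a : Int) (b : Int) (out : Bool) : Prop := out = solve_alt a b
instance (a : Int) (b : Int) (out : Bool) : Decidable (Spec_solve a b out) := by unfold Spec_solve; infer_instance

-- ===== CLAIM (what is proved, stated in full; the proofs are below) =====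
def Claim_equal_solve : Prop := ∀ (a : Int) (b : Int), Dom_solve a b → Pre_solve a b → Spec_solve a b (solve a b)

-- ===== LEMMAS AND PROOFS =====

-- recursive characterisation of A's delta list
def pvDrec : List Int → List Int
  | x :: y :: t => (y - x) :: pvDrec (y :: t)
  | _ => []

theorem pvDeltas_eq_drec (xs : List Int) : pvDeltas xs = pvDrec xs := by
  induction xs with
  | nil => rfl
  | cons x t ih =>
      cases t with
      | nil => rfl
      | cons y s =>
          have hstep : pvDeltas (x :: y :: s) = (y - x) :: pvDeltas (y :: s) := by
            unfold pvDeltas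
            simp only [List.length_cons]
            rw [show s.length + 1 + 1 - 1 = s.length + 1 from rfl,
                show s.length + 1 - 1 = s.length from rfl,
                List.range_succ_eq_map, List.map_cons, List.map_map]
            congr 1
          rw [hstep, ih]
          rfl

-- the key algebraic fact: equal consecutive-delta lists ↔ constant positional difference
theorem pvKey (t s : List Int) (x y : Int) (h : t.length = s.length) :
    (pvDrec (x :: t) = pvDrec (y :: s)) ↔
      (∀ p ∈ (x :: t).zip (y :: s), p.1 - p.2 = x - y) := by
  induction t generalizing s x y with
  | nil =>
      cases s with
      | nil => simp [pvDrec]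
      | cons y' s' => simp at h
  | cons x' t' ih =>
      cases s with
      | nil => simp at h
      | cons y' s' =>
          simp only [List.length_cons, Nat.add_right_cancel_iff] at h
          have ih' := ih s' x' y' h
          constructor
          · rintro heq p hp
            simp only [pvDrec, List.cons.injEq] at heq
            obtain ⟨h1, h2⟩ := heq
            rcases List.mem_cons.mp hp with rfl | hp'
            · rfl
            · have := (ih'.mp h2) p hp'
              omega
          · intro hall
            have hx' : x' - y' = x - y := hall (x', y') (by simp [List.zip])
            simp only [pvDrec, List.cons.injEq]
            refine ⟨by omega, ih'.mpr ?_⟩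
            intro p hp
            have := hall p (List.mem_cons_of_mem _ hp)
            omega

theorem zip_map_pm {α β : Type} (f : α → β) (xs ys : List α) :
    (xs.map f).zip (ys.map f) = (xs.zip ys).map (Prod.map f f) := by
  induction xs generalizing ys with
  | nil => simp
  | cons x t ih => cases ys <;> simp [ih]

theorem solve_eq_alt (a b : Int) : solve a b = solve_alt a b := by
  unfold solve solve_alt pvDigits
  set f : Char → Int := fun c => (c.toNat : Int) - 48 with hf
  simp only [List.length_map]
  generalize (PySem.Int.toStr a).toList = sa
  generalize (PySem.Int.toStr b).toList = sb
  by_cases hlen : sa.length = sb.length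
  · simp only [hlen, ne_eq, not_true_eq_false, if_false]
    cases sa with
    | nil =>
        cases sb with
        | nil => simp [pvDeltas]
        | cons y ys => simp at hlen
    | cons x xs =>
        cases sb with
        | nil => simp at hlen
        | cons y ys =>
            simp only [List.length_cons, Nat.add_right_cancel_iff] at hlen
            rw [pvDeltas_eq_drec, pvDeltas_eq_drec]
            have key := pvKey (xs.map f) (ys.map f) (f x) (f y) (by simp [hlen])
            have key2 : (pvDrec (f x :: xs.map f) = pvDrec (f y :: ys.map f)) ↔
                (∀ p ∈ (x :: xs).zip (y :: ys),
                  ((p.1.toNat : Int) - (p.2.toNat : Int)) = (x.toNat : Int) - (y.toNat : Int)) := by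
              rw [key, ← List.map_cons, ← List.map_cons, zip_map_pm]
              constructor
              · intro h p hp
                have := h (Prod.map f f p) (List.mem_map_of_mem hp)
                simp only [hf, Prod.map] at this
                omega
              · intro h q hq
                obtain ⟨p, hp, rfl⟩ := List.mem_map.mp hq
                have := h p hp
                simp only [hf, Prod.map]
                omega
            simp only [List.map_cons]
            by_cases hd : pvDrec (f x :: xs.map f) = pvDrec (f y :: ys.map f)
            · rw [if_neg (fun h => h hd)]
              symm
              rw [List.all_eq_true]
              intro p hp
              have := (key2.mp hd) p hp
              simpa using this
            · rw [if_pos hd]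
              symm
              rw [Bool.eq_false_iff]
              intro hall
              apply hd
              apply key2.mpr
              intro p hp
              have := List.all_eq_true.mp hall p hp
              simpa using this
  · simp [hlen]

-- ===== VERDICT (by name: the statement is the Claim_ definition above) =====
theorem solve_spec : Claim_equal_solve := by
  intro a b _ _
  exact solve_eq_alt a b
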